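-- pv_equiv track=rewrite | github.com/andrew867/LuxPower-Advanced | setup_energy_dashboard.py | find_luxpower_entities
-- ===== SOURCE A (Python) =====
-- from typing import Dict, List, Optional
--
-- def find_luxpower_entities(entities: List[Dict]) -> Dict[str, List[str]]:
--     """Find LuxPower entities by type."""
--     luxpower_entities = {
--         'solar_production': [],
--         'battery_charge': [],
--         'battery_discharge': [],
--         'grid_consumption': [],
--         'grid_feed_in': [],
--         'home_consumption': []
--     }
--
--     for entity in entities:
--         entity_id = entity.get('entity_id', '')
--         if not entity_id.startswith('sensor.lux_'):
--             continue
--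
--         # Solar production sensors
--         if any(keyword in entity_id.lower() for keyword in ['solar', 'pv', 'array']):
--             if 'daily' in entity_id.lower() or 'total' in entity_id.lower():
--                 luxpower_entities['solar_production'].append(entity_id)
--
--         # Battery charge sensors
--         elif 'battery_charge' in entity_id.lower() and ('daily' in entity_id.lower() or 'total' in entity_id.lower()):
--             luxpower_entities['battery_charge'].append(entity_id)
--
--         # Battery discharge sensors
--         elif 'battery_discharge' in entity_id.lower() and ('daily' in entity_id.lower() or 'total' in entity_id.lower()):
--             luxpower_entities['battery_discharge'].append(entity_id)
--
--         # Grid consumption sensors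
--         elif 'power_from_grid' in entity_id.lower() and ('daily' in entity_id.lower() or 'total' in entity_id.lower()):
--             luxpower_entities['grid_consumption'].append(entity_id)
--
--         # Grid feed-in sensors
--         elif 'power_to_grid' in entity_id.lower() and ('daily' in entity_id.lower() or 'total' in entity_id.lower()):
--             luxpower_entities['grid_feed_in'].append(entity_id)
--
--         # Home consumption sensors
--         elif 'power_from_inverter' in entity_id.lower() and ('daily' in entity_id.lower() or 'total' in entity_id.lower()):
--             luxpower_entities['home_consumption'].append(entity_id)
--
--     return luxpower_entities
-- ===== SOURCE B (Python) =====
-- # B: two staged passes instead of one classifying loop: first collect the qualifying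
-- # candidate ids (prefix + daily/total), then build each category's list by its own
-- # comprehension, excluding ids that an earlier category's keywords already claim.
-- # Objective: alternative decomposition (column-wise per-category filtering).
-- GROUPS = [
--     ('solar_production', ['solar', 'pv', 'array']),
--     ('battery_charge', ['battery_charge']),
--     ('battery_discharge', ['battery_discharge']),
--     ('grid_consumption', ['power_from_grid']),
--     ('grid_feed_in', ['power_to_grid']),
--     ('home_consumption', ['power_from_inverter']),
-- ]
--
-- def find_luxpower_entities(entities):
--     candidates = []
--     for entity in entities:
--         eid = entity.get('entity_id', '')
--         low = eid.lower()
--         if eid.startswith('sensor.lux_') and ('daily' in low or 'total' in low):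
--             candidates.append(eid)
--     result = {}
--     seen = []
--     for cat, kws in GROUPS:
--         result[cat] = [eid for eid in candidates
--                        if any(k in eid.lower() for k in kws)
--                        and not any(k in eid.lower() for k in seen)]
--         seen = seen + kws
--     return result
-- ===== Notes on version B (the rewrite author's own statement) =====
-- stated objective: alternative
-- what changed: Replaces the single row-wise loop with an elif cascade mutating a dict by two staged passes: first a filter collecting candidate ids (prefix + daily/total), then one independent comprehension per category whose predicate excludes ids claimed by earlier categories' keywords.
import Mathlib
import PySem

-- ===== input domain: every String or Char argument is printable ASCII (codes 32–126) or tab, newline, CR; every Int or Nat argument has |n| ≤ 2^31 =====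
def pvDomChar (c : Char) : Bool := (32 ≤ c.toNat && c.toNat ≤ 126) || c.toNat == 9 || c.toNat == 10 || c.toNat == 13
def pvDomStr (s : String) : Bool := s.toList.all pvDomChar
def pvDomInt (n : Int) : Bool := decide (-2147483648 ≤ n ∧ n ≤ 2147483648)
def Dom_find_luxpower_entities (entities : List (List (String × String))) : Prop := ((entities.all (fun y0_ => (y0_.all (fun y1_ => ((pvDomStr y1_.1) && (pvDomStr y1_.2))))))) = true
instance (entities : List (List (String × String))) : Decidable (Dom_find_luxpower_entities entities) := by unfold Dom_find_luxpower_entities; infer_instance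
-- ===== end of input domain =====

-- B replaces A's single classifying loop (elif cascade mutating a dict) by two staged passes:
-- a candidate filter, then one independent per-category filter excluding earlier categories'
-- keywords; objective: alternative decomposition. Proved equal on all inputs.


-- entity.get('entity_id', '') — shared by both ports (both Pythons contain this line)
def pvEidOf (e : List (String × String)) : String :=
  PySem.Dict.getD (PySem.Dict.ofList e) "entity_id" ""

-- ===== PORT A =====
def pvInitA : PySem.Dict String (List String) :=
  PySem.Dict.ofList [("solar_production", []), ("battery_charge", []), ("battery_discharge", []),
                     ("grid_consumption", []), ("grid_feed_in", []), ("home_consumption", [])]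

def pvStepA (d : PySem.Dict String (List String)) (entity : List (String × String)) :
    PySem.Dict String (List String) :=
  let eid := pvEidOf entity
  if ! PySem.Str.startswith eid "sensor.lux_" then d
  else
    let low := PySem.Str.lower eid
    let period := PySem.Str.isIn "daily" low || PySem.Str.isIn "total" low
    if PySem.Str.isIn "solar" low || PySem.Str.isIn "pv" low || PySem.Str.isIn "array" low then
      if period then d.modify "solar_production" [] (· ++ [eid]) else d
    else if PySem.Str.isIn "battery_charge" low && period then
      d.modify "battery_charge" [] (· ++ [eid])
    else if PySem.Str.isIn "battery_discharge" low && period then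
      d.modify "battery_discharge" [] (· ++ [eid])
    else if PySem.Str.isIn "power_from_grid" low && period then
      d.modify "grid_consumption" [] (· ++ [eid])
    else if PySem.Str.isIn "power_to_grid" low && period then
      d.modify "grid_feed_in" [] (· ++ [eid])
    else if PySem.Str.isIn "power_from_inverter" low && period then
      d.modify "home_consumption" [] (· ++ [eid])
    else d

def find_luxpower_entities (entities : List (List (String × String))) : List (String × List String) :=
  (entities.foldl pvStepA pvInitA).items

-- ===== PORT B =====
def pvGroupsB : List (String × List String) :=
  [("solar_production", ["solar", "pv", "array"]),
   ("battery_charge", ["battery_charge"]),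
   ("battery_discharge", ["battery_discharge"]),
   ("grid_consumption", ["power_from_grid"]),
   ("grid_feed_in", ["power_to_grid"]),
   ("home_consumption", ["power_from_inverter"])]

-- first pass: candidates with the sensor.lux_ prefix and a daily/total marker
def pvCandidates (entities : List (List (String × String))) : List String :=
  entities.foldl (fun acc entity =>
    let eid := pvEidOf entity
    let low := PySem.Str.lower eid
    if PySem.Str.startswith eid "sensor.lux_" &&
       (PySem.Str.isIn "daily" low || PySem.Str.isIn "total" low)
    then acc ++ [eid] else acc) []

def pvAnyIn (kws : List String) (low : String) : Bool :=
  kws.any (fun k => PySem.Str.isIn k low)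

-- second stage: one filter per category, excluding ids matched by earlier groups' keywords
def find_luxpower_entities_alt (entities : List (List (String × String))) : List (String × List String) :=
  let cands := pvCandidates entities
  (pvGroupsB.foldl (fun (acc : List (String × List String) × List String) g =>
      (acc.1 ++ [(g.1, cands.filter (fun eid =>
          pvAnyIn g.2 (PySem.Str.lower eid) && ! pvAnyIn acc.2 (PySem.Str.lower eid)))],
       acc.2 ++ g.2)) ([], [])).1

-- ===== PRECONDITION & SPEC =====
def Spec_find_luxpower_entities (entities : List (List (String × String))) (out : List (String × List String)) : Prop := out = find_luxpower_entities_alt entities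
instance (entities : List (List (String × String))) (out : List (String × List String)) : Decidable (Spec_find_luxpower_entities entities out) := by unfold Spec_find_luxpower_entities; infer_instance

-- ===== CLAIM (what is proved, stated in full; the proofs are below) =====
def Claim_equal_find_luxpower_entities : Prop := ∀ (entities : List (List (String × String))), Dom_find_luxpower_entities entities → Spec_find_luxpower_entities entities (find_luxpower_entities entities)

-- ===== LEMMAS AND PROOFS =====

-- literal dict over the six fixed category keys
def mkD (l1 l2 l3 l4 l5 l6 : List String) : PySem.Dict String (List String) :=
  PySem.Dict.mk [("solar_production", l1), ("battery_charge", l2), ("battery_discharge", l3),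
                 ("grid_consumption", l4), ("grid_feed_in", l5), ("home_consumption", l6)]

-- A's per-category append condition for one entity id (the cascade, flattened)
def pvQ1 (eid : String) : Bool :=
  PySem.Str.startswith eid "sensor.lux_" &&
  (PySem.Str.isIn "solar" (PySem.Str.lower eid) || PySem.Str.isIn "pv" (PySem.Str.lower eid) ||
   PySem.Str.isIn "array" (PySem.Str.lower eid)) &&
  (PySem.Str.isIn "daily" (PySem.Str.lower eid) || PySem.Str.isIn "total" (PySem.Str.lower eid))

def pvQk (kw : String) (excl : List String) (eid : String) : Bool :=
  PySem.Str.startswith eid "sensor.lux_" &&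
  ! pvAnyIn excl (PySem.Str.lower eid) &&
  PySem.Str.isIn kw (PySem.Str.lower eid) &&
  (PySem.Str.isIn "daily" (PySem.Str.lower eid) || PySem.Str.isIn "total" (PySem.Str.lower eid))

def pvE1 : List String := ["solar", "pv", "array"]
def pvE2 : List String := ["solar", "pv", "array", "battery_charge"]
def pvE3 : List String := ["solar", "pv", "array", "battery_charge", "battery_discharge"]
def pvE4 : List String := ["solar", "pv", "array", "battery_charge", "battery_discharge", "power_from_grid"]
def pvE5 : List String := ["solar", "pv", "array", "battery_charge", "battery_discharge", "power_from_grid", "power_to_grid"]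

def pvCond (eid : String) : Bool :=
  PySem.Str.startswith eid "sensor.lux_" &&
  (PySem.Str.isIn "daily" (PySem.Str.lower eid) || PySem.Str.isIn "total" (PySem.Str.lower eid))

lemma pvModify1 (l1 l2 l3 l4 l5 l6 : List String) (f : List String → List String) :
    (mkD l1 l2 l3 l4 l5 l6).modify "solar_production" [] f = mkD (f l1) l2 l3 l4 l5 l6 := rfl

lemma pvModify2 (l1 l2 l3 l4 l5 l6 : List String) (f : List String → List String) :
    (mkD l1 l2 l3 l4 l5 l6).modify "battery_charge" [] f = mkD l1 (f l2) l3 l4 l5 l6 := rfl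

lemma pvModify3 (l1 l2 l3 l4 l5 l6 : List String) (f : List String → List String) :
    (mkD l1 l2 l3 l4 l5 l6).modify "battery_discharge" [] f = mkD l1 l2 (f l3) l4 l5 l6 := rfl

lemma pvModify4 (l1 l2 l3 l4 l5 l6 : List String) (f : List String → List String) :
    (mkD l1 l2 l3 l4 l5 l6).modify "grid_consumption" [] f = mkD l1 l2 l3 (f l4) l5 l6 := rfl

lemma pvModify5 (l1 l2 l3 l4 l5 l6 : List String) (f : List String → List String) :
    (mkD l1 l2 l3 l4 l5 l6).modify "grid_feed_in" [] f = mkD l1 l2 l3 l4 (f l5) l6 := rfl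

lemma pvModify6 (l1 l2 l3 l4 l5 l6 : List String) (f : List String → List String) :
    (mkD l1 l2 l3 l4 l5 l6).modify "home_consumption" [] f = mkD l1 l2 l3 l4 l5 (f l6) := rfl

set_option maxHeartbeats 4000000 in
lemma pvStepA_mkD (l1 l2 l3 l4 l5 l6 : List String) (e : List (String × String)) :
    pvStepA (mkD l1 l2 l3 l4 l5 l6) e =
      mkD (if pvQ1 (pvEidOf e) then l1 ++ [pvEidOf e] else l1)
          (if pvQk "battery_charge" pvE1 (pvEidOf e) then l2 ++ [pvEidOf e] else l2)
          (if pvQk "battery_discharge" pvE2 (pvEidOf e) then l3 ++ [pvEidOf e] else l3)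
          (if pvQk "power_from_grid" pvE3 (pvEidOf e) then l4 ++ [pvEidOf e] else l4)
          (if pvQk "power_to_grid" pvE4 (pvEidOf e) then l5 ++ [pvEidOf e] else l5)
          (if pvQk "power_from_inverter" pvE5 (pvEidOf e) then l6 ++ [pvEidOf e] else l6) := by
  simp only [pvStepA, pvQ1, pvQk, pvAnyIn, pvE1, pvE2, pvE3, pvE4, pvE5,
    List.any_cons, List.any_nil, Bool.or_false]
  generalize pvEidOf e = eid
  rcases Bool.eq_false_or_eq_true (PySem.Str.startswith eid "sensor.lux_") with hb0 | hb0 <;>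
    (try simp only [hb0, Bool.not_true, Bool.not_false, Bool.true_and, Bool.false_and, Bool.and_true, Bool.and_false, Bool.or_true, Bool.or_false, Bool.true_or, Bool.false_or, eq_self_iff_true, Bool.false_eq_true, if_true, if_false, pvModify1, pvModify2, pvModify3, pvModify4, pvModify5, pvModify6]) <;>
  rcases Bool.eq_false_or_eq_true (PySem.Str.isIn "daily" (PySem.Str.lower eid)) with hb1 | hb1 <;>
    (try simp only [hb1, Bool.not_true, Bool.not_false, Bool.true_and, Bool.false_and, Bool.and_true, Bool.and_false, Bool.or_true, Bool.or_false, Bool.true_or, Bool.false_or, eq_self_iff_true, Bool.false_eq_true, if_true, if_false, pvModify1, pvModify2, pvModify3, pvModify4, pvModify5, pvModify6]) <;>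
  rcases Bool.eq_false_or_eq_true (PySem.Str.isIn "total" (PySem.Str.lower eid)) with hb2 | hb2 <;>
    (try simp only [hb2, Bool.not_true, Bool.not_false, Bool.true_and, Bool.false_and, Bool.and_true, Bool.and_false, Bool.or_true, Bool.or_false, Bool.true_or, Bool.false_or, eq_self_iff_true, Bool.false_eq_true, if_true, if_false, pvModify1, pvModify2, pvModify3, pvModify4, pvModify5, pvModify6]) <;>
  rcases Bool.eq_false_or_eq_true (PySem.Str.isIn "solar" (PySem.Str.lower eid)) with hb3 | hb3 <;>
    (try simp only [hb3, Bool.not_true, Bool.not_false, Bool.true_and, Bool.false_and, Bool.and_true, Bool.and_false, Bool.or_true, Bool.or_false, Bool.true_or, Bool.false_or, eq_self_iff_true, Bool.false_eq_true, if_true, if_false, pvModify1, pvModify2, pvModify3, pvModify4, pvModify5, pvModify6]) <;>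
  rcases Bool.eq_false_or_eq_true (PySem.Str.isIn "pv" (PySem.Str.lower eid)) with hb4 | hb4 <;>
    (try simp only [hb4, Bool.not_true, Bool.not_false, Bool.true_and, Bool.false_and, Bool.and_true, Bool.and_false, Bool.or_true, Bool.or_false, Bool.true_or, Bool.false_or, eq_self_iff_true, Bool.false_eq_true, if_true, if_false, pvModify1, pvModify2, pvModify3, pvModify4, pvModify5, pvModify6]) <;>
  rcases Bool.eq_false_or_eq_true (PySem.Str.isIn "array" (PySem.Str.lower eid)) with hb5 | hb5 <;>
    (try simp only [hb5, Bool.not_true, Bool.not_false, Bool.true_and, Bool.false_and, Bool.and_true, Bool.and_false, Bool.or_true, Bool.or_false, Bool.true_or, Bool.false_or, eq_self_iff_true, Bool.false_eq_true, if_true, if_false, pvModify1, pvModify2, pvModify3, pvModify4, pvModify5, pvModify6]) <;>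
  rcases Bool.eq_false_or_eq_true (PySem.Str.isIn "battery_charge" (PySem.Str.lower eid)) with hb6 | hb6 <;>
    (try simp only [hb6, Bool.not_true, Bool.not_false, Bool.true_and, Bool.false_and, Bool.and_true, Bool.and_false, Bool.or_true, Bool.or_false, Bool.true_or, Bool.false_or, eq_self_iff_true, Bool.false_eq_true, if_true, if_false, pvModify1, pvModify2, pvModify3, pvModify4, pvModify5, pvModify6]) <;>
  rcases Bool.eq_false_or_eq_true (PySem.Str.isIn "battery_discharge" (PySem.Str.lower eid)) with hb7 | hb7 <;>
    (try simp only [hb7, Bool.not_true, Bool.not_false, Bool.true_and, Bool.false_and, Bool.and_true, Bool.and_false, Bool.or_true, Bool.or_false, Bool.true_or, Bool.false_or, eq_self_iff_true, Bool.false_eq_true, if_true, if_false, pvModify1, pvModify2, pvModify3, pvModify4, pvModify5, pvModify6]) <;>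
  rcases Bool.eq_false_or_eq_true (PySem.Str.isIn "power_from_grid" (PySem.Str.lower eid)) with hb8 | hb8 <;>
    (try simp only [hb8, Bool.not_true, Bool.not_false, Bool.true_and, Bool.false_and, Bool.and_true, Bool.and_false, Bool.or_true, Bool.or_false, Bool.true_or, Bool.false_or, eq_self_iff_true, Bool.false_eq_true, if_true, if_false, pvModify1, pvModify2, pvModify3, pvModify4, pvModify5, pvModify6]) <;>
  rcases Bool.eq_false_or_eq_true (PySem.Str.isIn "power_to_grid" (PySem.Str.lower eid)) with hb9 | hb9 <;>
    (try simp only [hb9, Bool.not_true, Bool.not_false, Bool.true_and, Bool.false_and, Bool.and_true, Bool.and_false, Bool.or_true, Bool.or_false, Bool.true_or, Bool.false_or, eq_self_iff_true, Bool.false_eq_true, if_true, if_false, pvModify1, pvModify2, pvModify3, pvModify4, pvModify5, pvModify6]) <;>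
  rcases Bool.eq_false_or_eq_true (PySem.Str.isIn "power_from_inverter" (PySem.Str.lower eid)) with hb10 | hb10 <;>
    (try simp only [hb10, Bool.not_true, Bool.not_false, Bool.true_and, Bool.false_and, Bool.and_true, Bool.and_false, Bool.or_true, Bool.or_false, Bool.true_or, Bool.false_or, eq_self_iff_true, Bool.false_eq_true, if_true, if_false, pvModify1, pvModify2, pvModify3, pvModify4, pvModify5, pvModify6])

lemma pvFoldA (es : List (List (String × String))) (l1 l2 l3 l4 l5 l6 : List String) :
    es.foldl pvStepA (mkD l1 l2 l3 l4 l5 l6) =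
      mkD (l1 ++ ((es.map pvEidOf).filter pvQ1))
          (l2 ++ ((es.map pvEidOf).filter (pvQk "battery_charge" pvE1)))
          (l3 ++ ((es.map pvEidOf).filter (pvQk "battery_discharge" pvE2)))
          (l4 ++ ((es.map pvEidOf).filter (pvQk "power_from_grid" pvE3)))
          (l5 ++ ((es.map pvEidOf).filter (pvQk "power_to_grid" pvE4)))
          (l6 ++ ((es.map pvEidOf).filter (pvQk "power_from_inverter" pvE5))) := by
  induction es generalizing l1 l2 l3 l4 l5 l6 with
  | nil => simp
  | cons e es ih =>
    rw [List.foldl_cons, pvStepA_mkD, ih]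
    simp only [List.map_cons, List.filter_cons]
    split_ifs <;> simp_all

lemma pvCandidates_eq (es : List (List (String × String))) :
    pvCandidates es = ((es.map pvEidOf).filter pvCond) := by
  show List.foldl (fun acc entity =>
      if pvCond (pvEidOf entity) then acc ++ [pvEidOf entity] else acc) [] es = _
  rw [PySem.List.foldl_append_if (fun e => pvCond (pvEidOf e)) pvEidOf es []]
  simp only [List.nil_append, List.filter_map, Function.comp_def]

-- base-filtered then category-filtered = A's flattened cascade condition, per category
lemma pvFilt1 (l : List String) :
    (l.filter pvCond).filter
        (fun eid => pvAnyIn ["solar", "pv", "array"] (PySem.Str.lower eid) &&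
          ! pvAnyIn [] (PySem.Str.lower eid)) = l.filter pvQ1 := by
  rw [List.filter_filter]
  apply List.filter_congr
  intro eid _
  simp only [pvCond, pvQ1, pvAnyIn, List.any_cons, List.any_nil, Bool.or_false]
  rcases Bool.eq_false_or_eq_true (PySem.Str.startswith eid "sensor.lux_") with h0 | h0 <;>
  rcases Bool.eq_false_or_eq_true (PySem.Str.isIn "solar" (PySem.Str.lower eid)) with h1 | h1 <;>
  rcases Bool.eq_false_or_eq_true (PySem.Str.isIn "pv" (PySem.Str.lower eid)) with h2 | h2 <;>
  rcases Bool.eq_false_or_eq_true (PySem.Str.isIn "array" (PySem.Str.lower eid)) with h3 | h3 <;>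
  rcases Bool.eq_false_or_eq_true (PySem.Str.isIn "daily" (PySem.Str.lower eid)) with h4 | h4 <;>
  rcases Bool.eq_false_or_eq_true (PySem.Str.isIn "total" (PySem.Str.lower eid)) with h5 | h5 <;>
  simp only [h0, h1, h2, h3, h4, h5] <;> rfl

lemma pvFiltk (kw : String) (excl : List String) (l : List String) :
    (l.filter pvCond).filter
        (fun eid => pvAnyIn [kw] (PySem.Str.lower eid) &&
          ! pvAnyIn excl (PySem.Str.lower eid)) = l.filter (pvQk kw excl) := by
  rw [List.filter_filter]
  apply List.filter_congr
  intro eid _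
  simp only [pvCond, pvQk, pvAnyIn, List.any_cons, List.any_nil, Bool.or_false]
  rcases Bool.eq_false_or_eq_true (PySem.Str.startswith eid "sensor.lux_") with h0 | h0 <;>
  rcases Bool.eq_false_or_eq_true (PySem.Str.isIn kw (PySem.Str.lower eid)) with h1 | h1 <;>
  rcases Bool.eq_false_or_eq_true (excl.any fun k => PySem.Str.isIn k (PySem.Str.lower eid)) with h2 | h2 <;>
  rcases Bool.eq_false_or_eq_true (PySem.Str.isIn "daily" (PySem.Str.lower eid)) with h4 | h4 <;>
  rcases Bool.eq_false_or_eq_true (PySem.Str.isIn "total" (PySem.Str.lower eid)) with h5 | h5 <;>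
  simp only [h0, h1, h2, h4, h5] <;> rfl

-- ===== VERDICT (by name: the statement is the Claim_ definition above) =====
theorem find_luxpower_entities_spec : Claim_equal_find_luxpower_entities := by
  intro entities _
  unfold Spec_find_luxpower_entities find_luxpower_entities find_luxpower_entities_alt
  have hinit : pvInitA = mkD [] [] [] [] [] [] := rfl
  rw [hinit, pvFoldA, pvCandidates_eq]
  simp only [pvGroupsB, List.foldl_cons, List.foldl_nil, List.nil_append, List.cons_append]
  rw [pvFilt1, pvFiltk, pvFiltk, pvFiltk, pvFiltk, pvFiltk]
  rfl
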